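-- pv_equiv track=rewrite | github.com/CanisW/poltype2 | PoltypeModules/forcebalancepoltypeinterface.py | GrabMoleculeOrder
-- ===== SOURCE A (Python) =====
-- def GrabMoleculeOrder(poltypepathlist,nametopropsarray):
--     nametoarrayindexorder={}
--     for name in nametopropsarray.keys():
--         if name=='':
--             continue
--         foundname=False
--         for poltypepathidx in range(len(poltypepathlist)):
--             poltypepath=poltypepathlist[poltypepathidx]
--             if name in poltypepath:
--                 foundname=True
--                 break
--         if foundname==False:
--             continue
--         nametoarrayindexorder[name]=poltypepathidx
--     return nametoarrayindexorder
-- ===== SOURCE B (Python) =====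
-- def GrabMoleculeOrder(poltypepathlist, nametopropsarray):
--     # One pass over the paths in index order, keeping the still-unresolved names;
--     # a name's first containing path wins, then results are emitted in key order.
--     firstidx = {}
--     remaining = [name for name in nametopropsarray if name != '']
--     for idx, path in enumerate(poltypepathlist):
--         still = []
--         for name in remaining:
--             if name in path:
--                 firstidx[name] = idx
--             else:
--                 still.append(name)
--         remaining = still
--     return {name: firstidx[name] for name in nametopropsarray if name in firstidx}
-- ===== Notes on version B (the rewrite author's own statement) =====
-- stated objective: alternative
-- what changed: Inverts the loop nesting: a single pass over the paths in index order, maintaining the list of still-unresolved names (each resolved name drops out of later scans), then emits results in key order; A instead rescans the whole path list from the start for every name.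
import Mathlib
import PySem

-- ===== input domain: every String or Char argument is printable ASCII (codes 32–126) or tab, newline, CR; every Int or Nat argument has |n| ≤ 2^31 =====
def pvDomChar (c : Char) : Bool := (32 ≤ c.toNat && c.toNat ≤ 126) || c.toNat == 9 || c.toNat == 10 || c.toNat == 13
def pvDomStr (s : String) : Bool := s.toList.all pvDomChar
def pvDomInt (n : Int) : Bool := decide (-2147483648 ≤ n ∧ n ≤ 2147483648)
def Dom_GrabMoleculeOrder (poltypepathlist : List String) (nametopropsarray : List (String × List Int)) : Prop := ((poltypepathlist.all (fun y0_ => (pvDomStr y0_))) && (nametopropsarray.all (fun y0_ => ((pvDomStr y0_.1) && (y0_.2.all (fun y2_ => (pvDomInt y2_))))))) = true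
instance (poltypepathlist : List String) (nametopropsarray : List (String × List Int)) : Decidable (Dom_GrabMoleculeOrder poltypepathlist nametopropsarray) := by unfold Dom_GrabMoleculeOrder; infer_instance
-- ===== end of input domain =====

-- B inverts the loop nesting: one pass over the paths keeping the still-unresolved names
-- (objective: alternative decomposition, same worst-case cost).


-- ===== PORT A =====
-- A's inner loop: scan the paths from index i, 'break' at the first path containing name
-- (some idx); none means foundname stayed False.
def pvFindA (name : String) (paths : List String) (i : Int) : Option Int :=
  match paths with
  | [] => none
  | p :: rest => if PySem.Str.isIn name p then some i else pvFindA name rest (i + 1)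

def GrabMoleculeOrder (poltypepathlist : List String) (nametopropsarray : List (String × List Int)) : List (String × Int) :=
  -- 'for name in nametopropsarray.keys()': the dict's keys are the first occurrences, in order
  ((PySem.List.dedup (nametopropsarray.map Prod.fst)).foldl
    (fun (d : PySem.Dict String Int) name =>
      if name = "" then d
      else match pvFindA name poltypepathlist 0 with
        | none => d                       -- foundname == False → continue
        | some idx => d.insert name idx) PySem.Dict.empty).items

-- ===== PORT B =====
-- one path against the still-unresolved names: record hits at idx, keep misses
def pvStepB (idx : Int) (path : String) (st : PySem.Dict String Int × List String) :
    PySem.Dict String Int × List String :=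
  st.2.foldl (fun (acc : PySem.Dict String Int × List String) name =>
      if PySem.Str.isIn name path then (acc.1.insert name idx, acc.2)
      else (acc.1, acc.2 ++ [name])) (st.1, [])

def GrabMoleculeOrder_alt (poltypepathlist : List String) (nametopropsarray : List (String × List Int)) : List (String × Int) :=
  let keys := PySem.List.dedup (nametopropsarray.map Prod.fst)
  let remaining0 := keys.filter (fun name => name ≠ "")
  let firstidx := ((PySem.List.enumerate poltypepathlist).foldl
      (fun st ip => pvStepB ip.1 ip.2 st) ((PySem.Dict.empty : PySem.Dict String Int), remaining0)).1
  -- final dict comprehension, keys in key order (firstidx[name] is guarded by the membership test,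
  -- so getD's default is never used)
  (keys.foldl (fun (d : PySem.Dict String Int) name =>
      if firstidx.contains name then d.insert name (firstidx.getD name 0) else d)
    PySem.Dict.empty).items

-- ===== PRECONDITION & SPEC =====
def Spec_GrabMoleculeOrder (poltypepathlist : List String) (nametopropsarray : List (String × List Int)) (out : List (String × Int)) : Prop := out = GrabMoleculeOrder_alt poltypepathlist nametopropsarray
instance (poltypepathlist : List String) (nametopropsarray : List (String × List Int)) (out : List (String × Int)) : Decidable (Spec_GrabMoleculeOrder poltypepathlist nametopropsarray out) := by unfold Spec_GrabMoleculeOrder; infer_instance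

-- ===== CLAIM (what is proved, stated in full; the proofs are below) =====
def Claim_equal_GrabMoleculeOrder : Prop := ∀ (poltypepathlist : List String) (nametopropsarray : List (String × List Int)), Dom_GrabMoleculeOrder poltypepathlist nametopropsarray → Spec_GrabMoleculeOrder poltypepathlist nametopropsarray (GrabMoleculeOrder poltypepathlist nametopropsarray)

-- ===== LEMMAS AND PROOFS =====

-- the inner fold of pvStepB: the dict side records 'some idx' exactly on the names of rem that
-- hit the path, and the list side appends the misses
theorem pvStepB_fold (path : String) (idx : Int) (rem : List String)
    (d : PySem.Dict String Int) (l : List String) (name : String) :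
    (rem.foldl (fun (acc : PySem.Dict String Int × List String) n =>
        if PySem.Str.isIn n path then (acc.1.insert n idx, acc.2)
        else (acc.1, acc.2 ++ [n])) (d, l)).1.get? name
      = (if name ∈ rem ∧ PySem.Str.isIn name path = true then some idx else d.get? name)
    ∧ (rem.foldl (fun (acc : PySem.Dict String Int × List String) n =>
        if PySem.Str.isIn n path then (acc.1.insert n idx, acc.2)
        else (acc.1, acc.2 ++ [n])) (d, l)).2
      = l ++ rem.filter (fun n => !(PySem.Str.isIn n path)) := by
  induction rem generalizing d l with
  | nil => simp
  | cons m rest ih =>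
    by_cases hm : PySem.Str.isIn m path = true
    · have hm' : PySem.Chars.isIn m.toList path.toList = true := by simpa using hm
      simp only [List.foldl_cons, hm, if_true]
      obtain ⟨ih1, ih2⟩ := ih (d.insert m idx) l
      constructor
      · rw [ih1, PySem.Dict.get?_insert]
        by_cases hne : name = m
        · subst hne
          by_cases hr : name ∈ rest <;> simp [hr, hm']
        · simp [List.mem_cons, hne]
      · rw [ih2]; simp [List.filter_cons, hm']
    · have hmf : PySem.Str.isIn m path = false := by
        revert hm; cases PySem.Str.isIn m path <;> simp
      have hmf' : PySem.Chars.isIn m.toList path.toList = false := by simpa using hmf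
      rw [List.foldl_cons, hmf]
      simp only [Bool.false_eq_true, if_false]
      obtain ⟨ih1, ih2⟩ := ih d (l ++ [m])
      refine ⟨?_, ?_⟩
      · rw [ih1]
        by_cases hne : name = m
        · subst hne; simp [hmf']
        · simp [List.mem_cons, hne]
      · rw [ih2]
        simp [List.filter_cons, hmf']

theorem pvStepB_fst (idx : Int) (path : String) (d : PySem.Dict String Int)
    (rem : List String) (name : String) :
    (pvStepB idx path (d, rem)).1.get? name
      = if name ∈ rem ∧ PySem.Str.isIn name path = true then some idx else d.get? name := by
  exact (pvStepB_fold path idx rem d [] name).1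

theorem pvStepB_snd (idx : Int) (path : String) (d : PySem.Dict String Int)
    (rem : List String) :
    (pvStepB idx path (d, rem)).2 = rem.filter (fun n => !(PySem.Str.isIn n path)) := by
  simpa using (pvStepB_fold path idx rem d [] "").2

-- the outer fold of B computes, for every name still unresolved, the first containing
-- path's index (pvFindA), and leaves resolved/absent names at the incoming dict value
theorem pvOuter_get? (paths : List String) (s : Int) (d : PySem.Dict String Int)
    (rem : List String) (name : String) :
    ((PySem.List.enumerate paths s).foldl (fun st ip => pvStepB ip.1 ip.2 st) (d, rem)).1.get? name
      = if name ∈ rem then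
          (match pvFindA name paths s with
           | some j => some j
           | none => d.get? name)
        else d.get? name := by
  induction paths generalizing s d rem with
  | nil =>
    simp [PySem.List.enumerate_nil, pvFindA]
  | cons p rest ih =>
    rw [PySem.List.enumerate_cons, List.foldl_cons]
    have hpair : pvStepB s p (d, rem)
        = ((pvStepB s p (d, rem)).1, rem.filter (fun n => !(PySem.Str.isIn n p))) := by
      rw [← pvStepB_snd s p d rem]
    rw [hpair, ih]
    by_cases hmem : name ∈ rem
    · by_cases hin : PySem.Str.isIn name p = true
      · have hnot : name ∉ rem.filter (fun n => !(PySem.Str.isIn n p)) := by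
          intro h
          have h2 := (List.mem_filter.mp h).2
          rw [hin] at h2
          simp at h2
        simp only [hnot, if_false, hmem, if_true, pvStepB_fst, hin, and_true, pvFindA]
      · have hinf : PySem.Str.isIn name p = false := by
          revert hin; cases PySem.Str.isIn name p <;> simp
        have hyes : name ∈ rem.filter (fun n => !(PySem.Str.isIn n p)) := by
          rw [List.mem_filter]
          exact ⟨hmem, by rw [hinf]; rfl⟩
        have hfa : pvFindA name (p :: rest) s = pvFindA name rest (s + 1) := by
          rw [pvFindA, hinf]; rfl
        have this1 : (pvStepB s p (d, rem)).1.get? name = d.get? name := by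
          rw [pvStepB_fst, hinf]; simp
        simp only [hyes, if_true, hmem, hfa, this1]
    · have hnot : name ∉ rem.filter (fun n => !(PySem.Str.isIn n p)) := by
        intro h; exact hmem (List.mem_filter.mp h).1
      simp only [hnot, hmem, if_false, pvStepB_fst]
      simp [hmem]

-- B's firstidx dict looks up to pvFindA on non-empty keys, none on ''/unknown names
theorem pvFirstidx_get? (paths : List String) (keys : List String) (name : String)
    (hmem : name ∈ keys) :
    ((PySem.List.enumerate paths 0).foldl (fun st ip => pvStepB ip.1 ip.2 st)
        ((PySem.Dict.empty : PySem.Dict String Int), keys.filter (fun n => n ≠ ""))).1.get? name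
      = if name = "" then none else pvFindA name paths 0 := by
  rw [pvOuter_get?]
  by_cases h0 : name = ""
  · simp [h0]
  · have : name ∈ keys.filter (fun n => n ≠ "") := by simp [List.mem_filter, hmem, h0]
    simp only [this, if_true, h0, if_false, PySem.Dict.get?_empty]
    cases pvFindA name paths 0 <;> simp

-- ===== VERDICT (by name: the statement is the Claim_ definition above) =====
theorem GrabMoleculeOrder_spec : Claim_equal_GrabMoleculeOrder := by
  intro paths props _
  unfold Spec_GrabMoleculeOrder GrabMoleculeOrder GrabMoleculeOrder_alt
  congr 1
  apply PySem.List.foldl_congr_mem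
  intro d name hname
  rw [PySem.Dict.contains_eq_isSome_get?, PySem.Dict.getD_eq_get?_getD,
      pvFirstidx_get? paths _ name hname]
  by_cases h0 : name = ""
  · simp [h0]
  · simp only [h0, if_false]
    cases h : pvFindA name paths 0 <;> simp
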